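-- pv_equiv track=rewrite | github.com/terrabrasilis/prodes-release-tasks | pg-to-raster-file/build_qml.py | __yellow
-- ===== SOURCE A (Python) =====
-- def __yellow(how_many=1):
--     """
--     Used to produce up to 57 yeallow variations as:
--      - 19 variations of yellow only increase blue step(10) [0-190] (red=255 and green=255);
--      - 15 variations of yellow decrease 20 of green and increase blue step(10) [0-150] (red=255 and green=235);
--      - 13 variations of yellow decrease 20 of green and increase blue step(10) [0-130] (red=255 and green=215);
--      - 10 variations of yellow decrease 20 of green and increase blue step(10) [0-100] (red=255 and green=195);
--
--      Usually to style the deforestations.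
--     """
--     # the limit of this function
--     if how_many>57:
--         raise Exception(f"Yellow variations were exceeded by {how_many-57} units. The maximum is 57 units.")
--     r=255 # no change
--     g=255
--     b=0
--     step=lambda c: c+10
--     color_list=[]
--     while(len(color_list)<how_many):
--         color_list.append('#{0:02x}{1:02x}{2:02x}'.format(r,g,b))
--         if len(color_list)<19:
--             b=step(b)
--         elif len(color_list)<34:
--             g=235
--             b=0 if len(color_list)==19 else step(b)
--         elif len(color_list)<47:
--             g=215
--             b=0 if len(color_list)==34 else step(b)
--         elif len(color_list)<57:
--             g=195
--             b=0 if len(color_list)==47 else step(b)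
--
--     return color_list
-- ===== SOURCE B (Python) =====
-- def __yellow(how_many=1):
--     if how_many > 57:
--         raise Exception(f"Yellow variations were exceeded by {how_many-57} units. The maximum is 57 units.")
--     colors = []
--     for g, count in [(255, 19), (235, 15), (215, 13), (195, 10)]:
--         for i in range(count):
--             if len(colors) >= how_many:
--                 return colors
--             colors.append('#{0:02x}{1:02x}{2:02x}'.format(255, g, i * 10))
--     return colors
-- ===== Notes on version B (the rewrite author's own statement) =====
-- stated objective: simpler
-- what changed: Replaced the stateful while-loop with cascading length-threshold branches by a data-driven (green, count) segment table with a nested loop and early return.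
import Mathlib
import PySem

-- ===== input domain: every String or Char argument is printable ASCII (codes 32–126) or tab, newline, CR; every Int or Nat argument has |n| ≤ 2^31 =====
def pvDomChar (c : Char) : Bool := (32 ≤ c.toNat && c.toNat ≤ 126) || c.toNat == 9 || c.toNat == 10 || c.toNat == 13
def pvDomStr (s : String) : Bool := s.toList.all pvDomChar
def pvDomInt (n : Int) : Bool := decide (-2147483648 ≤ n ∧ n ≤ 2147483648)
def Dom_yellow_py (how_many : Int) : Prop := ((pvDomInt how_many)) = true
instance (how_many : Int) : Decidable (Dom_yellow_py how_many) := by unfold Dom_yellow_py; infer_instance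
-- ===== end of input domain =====

-- B replaces A's stateful while-loop with cascading threshold branches by a data-driven
-- (green, count) segment table with a nested loop and early return; objective: simpler.

-- shared helper: Python's '#{0:02x}{1:02x}{2:02x}'.format(r,g,b) for 0 ≤ r,g,b ≤ 255 (exact there)
def pvHexDigit (n : Nat) : Char := if n < 10 then Char.ofNat (48 + n) else Char.ofNat (87 + n)
def pvHexByte (n : Int) : List Char := [pvHexDigit (n.toNat / 16), pvHexDigit (n.toNat % 16)]
def pvFmtColor (r g b : Int) : String := String.ofList ('#' :: (pvHexByte r ++ pvHexByte g ++ pvHexByte b))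

-- ===== PORT A =====
-- A's while-loop; state (g, b, color_list); r is always 255 (never changed by A)
-- fuel = how_many.toNat makes the recursion structural; the loop body consumes exactly one
-- fuel per appended colour, so fuel never runs out before the Python loop's own exit test.
def yellowLoop (fuel : Nat) (how_many : Int) (g b : Int) (acc : List String) : List String :=
  match fuel with
  | 0 => acc
  | fuel + 1 =>
    if (acc.length : Int) < how_many then
      let acc' := acc ++ [pvFmtColor 255 g b]
      if acc'.length < 19 then yellowLoop fuel how_many g (b + 10) acc'
      else if acc'.length < 34 then yellowLoop fuel how_many 235 (if acc'.length = 19 then 0 else b + 10) acc'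
      else if acc'.length < 47 then yellowLoop fuel how_many 215 (if acc'.length = 34 then 0 else b + 10) acc'
      else if acc'.length < 57 then yellowLoop fuel how_many 195 (if acc'.length = 47 then 0 else b + 10) acc'
      else yellowLoop fuel how_many g b acc'
    else acc

def yellow_py (how_many : Int) : List String :=
  if 57 < how_many then []  -- Python raises here; excluded by Pre_yellow_py
  else yellowLoop how_many.toNat how_many 255 0 []

-- ===== PORT B =====
-- inner 'for i in range(count)' with the early 'return colors' (.inl = early return)
def altInner (how_many : Int) (g : Int) (acc : List String) : List Nat → (List String) ⊕ (List String)
  | [] => .inr acc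
  | i :: rest =>
      if how_many ≤ (acc.length : Int) then .inl acc
      else altInner how_many g (acc ++ [pvFmtColor 255 g (i * 10)]) rest

-- outer 'for g, count in [...]'
def altOuter (how_many : Int) (acc : List String) : List (Int × Nat) → List String
  | [] => acc
  | (g, c) :: rest =>
      match altInner how_many g acc (List.range c) with
      | .inl done => done
      | .inr acc' => altOuter how_many acc' rest

def yellow_py_alt (how_many : Int) : List String :=
  if 57 < how_many then []  -- Python raises here; excluded by Pre_yellow_py
  else altOuter how_many [] [(255, 19), (235, 15), (215, 13), (195, 10)]

-- ===== PRECONDITION & SPEC =====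
-- A raises an Exception whenever how_many > 57; exactly those inputs are excluded.
def Pre_yellow_py (how_many : Int) : Prop := how_many ≤ 57
instance (how_many : Int) : Decidable (Pre_yellow_py how_many) := by unfold Pre_yellow_py; infer_instance
def pvWitness_yellow_py : Int := (10)

def Spec_yellow_py (how_many : Int) (out : List String) : Prop := out = yellow_py_alt how_many
instance (how_many : Int) (out : List String) : Decidable (Spec_yellow_py how_many out) := by unfold Spec_yellow_py; infer_instance

-- ===== CLAIM (what is proved, stated in full; the proofs are below) =====
def Claim_equal_yellow_py : Prop := ∀ (how_many : Int), Dom_yellow_py how_many → Pre_yellow_py how_many → Spec_yellow_py how_many (yellow_py how_many)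

-- ===== LEMMAS AND PROOFS =====

-- both return [] when how_many ≤ 0
lemma yellow_py_nonpos (n : Int) (h : n ≤ 0) : yellow_py n = [] := by
  rw [yellow_py, if_neg (by omega), show n.toNat = 0 from by omega, yellowLoop]

lemma yellow_py_alt_nonpos (n : Int) (h : n ≤ 0) : yellow_py_alt n = [] := by
  rw [yellow_py_alt, if_neg (by omega)]
  have hr : List.range 19 = 0 :: List.range' 1 18 := by decide
  simp [altOuter, hr, altInner, h]

-- on 0 < n ≤ 57 the two ports agree (finite check)
lemma yellow_eq_small : ∀ k : Nat, k < 58 → yellow_py (k : Int) = yellow_py_alt (k : Int) := by decide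

-- ===== VERDICT (by name: the statement is the Claim_ definition above) =====
theorem yellow_py_spec : Claim_equal_yellow_py := by
  intro n _ hpre
  unfold Spec_yellow_py
  by_cases h0 : n ≤ 0
  · rw [yellow_py_nonpos n h0, yellow_py_alt_nonpos n h0]
  · have hk : n = ((n.toNat : Nat) : Int) := by omega
    rw [hk]
    exact yellow_eq_small n.toNat (by unfold Pre_yellow_py at hpre; omega)
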